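-- pv_equiv track=rewrite | github.com/vaachak-platform/vaachak-os | tools/validate_sd_font_pack.py | is_83_font_name
-- ===== SOURCE A (Python) =====
-- def is_83_font_name(name: str) -> bool:
--     if "." not in name:
--         return False
--     base, ext = name.rsplit(".", 1)
--     if ext.upper() != "VFN":
--         return False
--     if not 1 <= len(base) <= 8:
--         return False
--     return all(ch.isupper() or ch.isdigit() or ch == "_" for ch in base)
-- ===== SOURCE B (Python) =====
-- ALLOWED = "ABCDEFGHIJKLMNOPQRSTUVWXYZ0123456789_"
--
--
-- def is_83_font_name(name: str) -> bool:
--     # suffix-first check: a valid name is 5..12 chars ending in ".vfn" (any case),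
--     # with every character before the extension drawn from ALLOWED
--     if len(name) < 5 or len(name) > 12:
--         return False
--     if name[-4:].lower() != ".vfn":
--         return False
--     return all(ch in ALLOWED for ch in name[:-4])
-- ===== Notes on version B (the rewrite author's own statement) =====
-- stated objective: idiomatic
-- what changed: B checks the fixed-width suffix first (length 5..12, last four chars case-insensitively '.vfn') and then tests each remaining char against an allowed-alphabet constant, instead of A's substring search, rsplit at the last dot, upper-compare and per-char isupper/isdigit loop.
import Mathlib
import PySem

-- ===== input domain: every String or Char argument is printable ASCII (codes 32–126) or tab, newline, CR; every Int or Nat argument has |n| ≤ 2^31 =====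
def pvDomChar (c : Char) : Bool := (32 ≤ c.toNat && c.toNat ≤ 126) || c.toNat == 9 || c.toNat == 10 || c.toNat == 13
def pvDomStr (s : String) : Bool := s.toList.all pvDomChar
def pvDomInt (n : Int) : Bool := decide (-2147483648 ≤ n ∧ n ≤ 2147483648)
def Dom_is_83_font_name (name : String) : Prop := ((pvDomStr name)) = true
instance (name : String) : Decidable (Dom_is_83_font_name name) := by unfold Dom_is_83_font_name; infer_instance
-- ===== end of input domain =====

-- B replaces A's rsplit-at-the-last-dot + upper-compare + isupper/isdigit scan by a
-- suffix-first check (length 5..12, last four chars lowercased = ".vfn", base chars in a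
-- constant alphabet); same value on every Dom input (idiomatic restructuring, no speed claim).

-- ===== PORT A =====
-- rsplit(".", 1) is not a PySem primitive; it is ported by hand, exactly: the extension is
-- the maximal dot-free suffix (takeWhile (· ≠ '.') on the reversed chars) and the base is
-- everything before the last dot — exact because the "." not in name case returned already.
def is_83_font_name (name : String) : Bool :=
  let s := name.toList
  if !(PySem.Chars.isIn ['.'] s) then false
  else
    let extRev := s.reverse.takeWhile (fun c => c != '.')
    let base := s.take (s.length - extRev.length - 1)
    let ext := extRev.reverse
    if !(PySem.Chars.upper ext == ['V', 'F', 'N']) then false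
    else if !(decide (1 ≤ base.length) && decide (base.length ≤ 8)) then false
    else base.all (fun ch => PySem.Chars.isupper ch || PySem.Chars.isdigit ch || ch == '_')

-- ===== PORT B =====
def pvAllowed : List Char := "ABCDEFGHIJKLMNOPQRSTUVWXYZ0123456789_".toList

def is_83_font_name_alt (name : String) : Bool :=
  let s := name.toList
  if s.length < 5 || 12 < s.length then false
  else if !(PySem.Chars.lower (PySem.Chars.slice s (some (-4)) none) == ['.', 'v', 'f', 'n']) then false
  else (PySem.Chars.slice s none (some (-4))).all (fun ch => pvAllowed.contains ch)

-- ===== PRECONDITION & SPEC =====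
def Spec_is_83_font_name (name : String) (out : Bool) : Prop := out = is_83_font_name_alt name
instance (name : String) (out : Bool) : Decidable (Spec_is_83_font_name name out) := by unfold Spec_is_83_font_name; infer_instance

-- ===== CLAIM (what is proved, stated in full; the proofs are below) =====
def Claim_equal_is_83_font_name : Prop := ∀ (name : String), Dom_is_83_font_name name → Spec_is_83_font_name name (is_83_font_name name)

-- ===== LEMMAS AND PROOFS =====

-- Any per-character Bool fact checked for all 128 ASCII codes transfers to every Dom character.
lemma pv_dom_char_check (p : Char → Bool)
    (hp : ((List.range 128).all fun n => !(pvDomChar (Char.ofNat n)) || p (Char.ofNat n)) = true)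
    (c : Char) (h : pvDomChar c = true) : p c = true := by
  have hlt : c.toNat < 128 := by
    simp only [pvDomChar, Bool.or_eq_true, Bool.and_eq_true, beq_iff_eq, decide_eq_true_eq] at h
    rcases h with ((⟨h1, h2⟩ | h) | h) | h <;> omega
  have := (List.all_eq_true.mp hp) c.toNat (List.mem_range.mpr hlt)
  rw [Char.ofNat_toNat] at this
  simpa [h] using this

lemma pv_class_eq (c : Char) (h : pvDomChar c = true) :
    (PySem.Chars.isupper c || PySem.Chars.isdigit c || c == '_') = pvAllowed.contains c := by
  have := pv_dom_char_check
    (fun c => (PySem.Chars.isupper c || PySem.Chars.isdigit c || c == '_') == pvAllowed.contains c)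
    (by decide) c h
  simpa using this

lemma pv_lower_dot (c : Char) (h : pvDomChar c = true) (hc : PySem.Chars.lowerChar c = '.') :
    c = '.' := by
  have := pv_dom_char_check (fun c => !(PySem.Chars.lowerChar c == '.') || c == '.') (by decide) c h
  simp [hc] at this; exact this

lemma pv_lower_v (c : Char) (h : pvDomChar c = true) (hc : PySem.Chars.lowerChar c = 'v') :
    c = 'V' ∨ c = 'v' := by
  have := pv_dom_char_check
    (fun c => !(PySem.Chars.lowerChar c == 'v') || (c == 'V' || c == 'v')) (by decide) c h
  simp [hc] at this; exact this

lemma pv_lower_f (c : Char) (h : pvDomChar c = true) (hc : PySem.Chars.lowerChar c = 'f') :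
    c = 'F' ∨ c = 'f' := by
  have := pv_dom_char_check
    (fun c => !(PySem.Chars.lowerChar c == 'f') || (c == 'F' || c == 'f')) (by decide) c h
  simp [hc] at this; exact this

lemma pv_lower_n (c : Char) (h : pvDomChar c = true) (hc : PySem.Chars.lowerChar c = 'n') :
    c = 'N' ∨ c = 'n' := by
  have := pv_dom_char_check
    (fun c => !(PySem.Chars.lowerChar c == 'n') || (c == 'N' || c == 'n')) (by decide) c h
  simp [hc] at this; exact this

lemma pv_upper_V (c : Char) (h : pvDomChar c = true) (hc : PySem.Chars.upperChar c = 'V') :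
    c = 'V' ∨ c = 'v' := by
  have := pv_dom_char_check
    (fun c => !(PySem.Chars.upperChar c == 'V') || (c == 'V' || c == 'v')) (by decide) c h
  simp [hc] at this; exact this

lemma pv_upper_F (c : Char) (h : pvDomChar c = true) (hc : PySem.Chars.upperChar c = 'F') :
    c = 'F' ∨ c = 'f' := by
  have := pv_dom_char_check
    (fun c => !(PySem.Chars.upperChar c == 'F') || (c == 'F' || c == 'f')) (by decide) c h
  simp [hc] at this; exact this

lemma pv_upper_N (c : Char) (h : pvDomChar c = true) (hc : PySem.Chars.upperChar c = 'N') :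
    c = 'N' ∨ c = 'n' := by
  have := pv_dom_char_check
    (fun c => !(PySem.Chars.upperChar c == 'N') || (c == 'N' || c == 'n')) (by decide) c h
  simp [hc] at this; exact this

-- Both ports hold exactly on strings of the shape base ++ ['.', v, f, n].
def pvShape (s : List Char) : Prop :=
  ∃ base v f n, s = base ++ ['.', v, f, n] ∧
    (v = 'V' ∨ v = 'v') ∧ (f = 'F' ∨ f = 'f') ∧ (n = 'N' ∨ n = 'n') ∧
    1 ≤ base.length ∧ base.length ≤ 8 ∧
    (∀ c ∈ base, (PySem.Chars.isupper c || PySem.Chars.isdigit c || c == '_') = true)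

lemma pv_a_eq (name : String) :
    is_83_font_name name =
      (PySem.Chars.isIn ['.'] name.toList &&
        (PySem.Chars.upper (name.toList.reverse.takeWhile (fun c => c != '.')).reverse ==
          ['V', 'F', 'N']) &&
        (decide (1 ≤ (name.toList.take (name.toList.length -
            (name.toList.reverse.takeWhile (fun c => c != '.')).length - 1)).length) &&
          decide ((name.toList.take (name.toList.length -
            (name.toList.reverse.takeWhile (fun c => c != '.')).length - 1)).length ≤ 8)) &&
        (name.toList.take (name.toList.length -
            (name.toList.reverse.takeWhile (fun c => c != '.')).length - 1)).all
          (fun ch => PySem.Chars.isupper ch || PySem.Chars.isdigit ch || ch == '_')) := by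
  simp only [is_83_font_name]
  cases h1 : PySem.Chars.isIn ['.'] name.toList <;>
    cases h2 : (PySem.Chars.upper (name.toList.reverse.takeWhile (fun c => c != '.')).reverse ==
      ['V', 'F', 'N']) <;>
      cases h3 : (decide (1 ≤ (name.toList.take (name.toList.length -
            (name.toList.reverse.takeWhile (fun c => c != '.')).length - 1)).length) &&
          decide ((name.toList.take (name.toList.length -
            (name.toList.reverse.takeWhile (fun c => c != '.')).length - 1)).length ≤ 8)) <;>
        simp_all

lemma pv_A_true_iff (name : String) (hdom : name.toList.all pvDomChar = true) :
    is_83_font_name name = true ↔ pvShape name.toList := by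
  rw [pv_a_eq]
  simp only [Bool.and_eq_true, beq_iff_eq, decide_eq_true_eq, List.all_eq_true]
  constructor
  · rintro ⟨⟨⟨hin, hup⟩, h1, h8⟩, hall⟩
    set s := name.toList with hsdef
    have hdot : '.' ∈ s.reverse := by
      rw [List.mem_reverse]
      exact (List.singleton_infix_iff '.' s).mp ((PySem.Chars.isIn_iff_infix _ _).mp hin)
    set t := s.reverse.takeWhile (fun c => c != '.') with ht
    set d := s.reverse.dropWhile (fun c => c != '.') with hd
    have hne : d ≠ [] := by
      intro hnil
      have := List.dropWhile_eq_nil_iff.mp (hd ▸ hnil) '.' hdot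
      simp at this
    have hhead : d.head hne = '.' := by
      have := List.head_dropWhile_not (fun c => c != '.') hne
      simpa using this
    have hdcons : d = '.' :: d.tail := by
      rw [← hhead]; exact (List.cons_head_tail hne).symm
    have hsplit : s.reverse = t ++ '.' :: d.tail := by
      rw [← hdcons, ht, hd, List.takeWhile_append_dropWhile]
    have hs : s = d.tail.reverse ++ '.' :: t.reverse := by
      have := congrArg List.reverse hsplit
      simpa using this
    have hm : t.reverse.map PySem.Chars.upperChar = ['V', 'F', 'N'] := hup
    rw [List.map_eq_cons_iff] at hm
    obtain ⟨e1, u1, he1, hu1, hm⟩ := hm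
    rw [List.map_eq_cons_iff] at hm
    obtain ⟨e2, u2, he2, hu2, hm⟩ := hm
    rw [List.map_eq_cons_iff] at hm
    obtain ⟨e3, u3, he3, hu3, hm⟩ := hm
    have hu3nil : u3 = [] := by simpa using hm
    subst hu3nil
    have hext : t.reverse = [e1, e2, e3] := by rw [he1, he2, he3]
    have hdome : ∀ c ∈ t.reverse, pvDomChar c = true := by
      intro c hc
      refine List.all_eq_true.mp hdom c ?_
      rw [hs]
      exact List.mem_append_right _ (List.mem_cons_of_mem _ hc)
    have he1' := pv_upper_V e1 (hdome e1 (by rw [hext]; simp)) hu1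
    have he2' := pv_upper_F e2 (hdome e2 (by rw [hext]; simp)) hu2
    have he3' := pv_upper_N e3 (hdome e3 (by rw [hext]; simp)) hu3
    have htlen : t.length = 3 := by
      have := congrArg List.length hext
      simpa using this
    have hslen : s.length = d.tail.length + 1 + t.length := by
      rw [hs]; simp; omega
    have hbase : s.take (s.length - t.length - 1) = d.tail.reverse := by
      rw [hs]
      exact List.take_left' (by simp; omega)
    refine ⟨d.tail.reverse, e1, e2, e3, ?_, he1', he2', he3', ?_, ?_, ?_⟩
    · rw [hs, hext]
    · rw [← hbase]; exact h1
    · rw [← hbase]; exact h8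
    · intro c hc
      exact hall c (by rw [hbase]; exact hc)
  · rintro ⟨base, v, f, n, hs, hv, hf, hn, h1, h8, hcls⟩
    have hvne : (v != '.') = true := by rcases hv with rfl | rfl <;> decide
    have hfne : (f != '.') = true := by rcases hf with rfl | rfl <;> decide
    have hnne : (n != '.') = true := by rcases hn with rfl | rfl <;> decide
    have hrev : name.toList.reverse = n :: f :: v :: '.' :: base.reverse := by
      rw [hs]; simp
    have ht : name.toList.reverse.takeWhile (fun c => c != '.') = [n, f, v] := by
      rw [hrev]
      simp [hvne, hfne, hnne]
    have hlen : name.toList.length = base.length + 4 := by rw [hs]; simp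
    have hbase : name.toList.take (name.toList.length -
        (name.toList.reverse.takeWhile (fun c => c != '.')).length - 1) = base := by
      rw [ht, hs]
      exact List.take_left' (by simp)
    refine ⟨⟨⟨?_, ?_⟩, ?_, ?_⟩, ?_⟩
    · rw [PySem.Chars.isIn_iff_infix, List.singleton_infix_iff, hs]
      simp
    · rw [ht]
      rcases hv with rfl | rfl <;> rcases hf with rfl | rfl <;> rcases hn with rfl | rfl <;> decide
    · rw [hbase]; exact h1
    · rw [hbase]; exact h8
    · intro c hc
      exact hcls c (by rw [hbase] at hc; exact hc)

lemma pv_alt_eq (name : String) :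
    is_83_font_name_alt name =
      (!(name.toList.length < 5 || 12 < name.toList.length) &&
        (PySem.Chars.lower (name.toList.drop (name.toList.length - 4)) == ['.', 'v', 'f', 'n']) &&
        (name.toList.take (name.toList.length - 4)).all (fun ch => pvAllowed.contains ch)) := by
  simp only [is_83_font_name_alt, PySem.Chars.slice_eq_listSlice]
  rw [PySem.List.slice_to_neg_ofNat _ 4 (by omega), PySem.List.slice_from_neg_ofNat _ 4 (by omega)]
  cases hb : (decide (name.toList.length < 5) || decide (12 < name.toList.length)) <;>
    cases hl : (PySem.Chars.lower (name.toList.drop (name.toList.length - 4)) == ['.', 'v', 'f', 'n']) <;>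
      simp_all

lemma pv_B_true_iff (name : String) (hdom : name.toList.all pvDomChar = true) :
    is_83_font_name_alt name = true ↔ pvShape name.toList := by
  rw [pv_alt_eq]
  simp only [Bool.and_eq_true, Bool.not_eq_eq_eq_not, Bool.not_true, Bool.or_eq_false_iff,
    decide_eq_false_iff_not, beq_iff_eq, List.all_eq_true]
  constructor
  · rintro ⟨⟨⟨h5, h12⟩, hlow⟩, hall⟩
    set s := name.toList with hsdef
    set k := s.length - 4 with hk
    have hlen4 : (s.drop k).length = 4 := by
      rw [List.length_drop]; omega
    have hm : (s.drop k).map PySem.Chars.lowerChar = ['.', 'v', 'f', 'n'] := hlow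
    rw [List.map_eq_cons_iff] at hm
    obtain ⟨c1, t1, hd1, hc1, hm⟩ := hm
    rw [List.map_eq_cons_iff] at hm
    obtain ⟨c2, t2, hd2, hc2, hm⟩ := hm
    rw [List.map_eq_cons_iff] at hm
    obtain ⟨c3, t3, hd3, hc3, hm⟩ := hm
    rw [List.map_eq_cons_iff] at hm
    obtain ⟨c4, t4, hd4, hc4, hm⟩ := hm
    have ht4 : t4 = [] := by simpa using hm
    subst ht4
    have hdrop : s.drop k = [c1, c2, c3, c4] := by
      rw [hd1, hd2, hd3, hd4]
    have hdomc : ∀ c ∈ s.drop k, pvDomChar c = true := fun c hc =>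
      List.all_eq_true.mp hdom c (List.mem_of_mem_drop hc)
    have hc1' : c1 = '.' := pv_lower_dot c1 (hdomc c1 (by rw [hdrop]; simp)) hc1
    have hc2' : c2 = 'V' ∨ c2 = 'v' := pv_lower_v c2 (hdomc c2 (by rw [hdrop]; simp)) hc2
    have hc3' : c3 = 'F' ∨ c3 = 'f' := pv_lower_f c3 (hdomc c3 (by rw [hdrop]; simp)) hc3
    have hc4' : c4 = 'N' ∨ c4 = 'n' := pv_lower_n c4 (hdomc c4 (by rw [hdrop]; simp)) hc4
    refine ⟨s.take k, c2, c3, c4, ?_, hc2', hc3', hc4', ?_, ?_, ?_⟩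
    · rw [← hc1', ← hdrop]; exact (List.take_append_drop k s).symm
    · rw [List.length_take]; omega
    · rw [List.length_take]; omega
    · intro c hc
      rw [pv_class_eq c (List.all_eq_true.mp hdom c (List.mem_of_mem_take hc))]
      exact hall c hc
  · rintro ⟨base, v, f, n, hs, hv, hf, hn, h1, h8, hcls⟩
    have hlen : name.toList.length = base.length + 4 := by rw [hs]; simp
    have hk : name.toList.length - 4 = base.length := by omega
    have htake : name.toList.take (name.toList.length - 4) = base := by
      rw [hk, hs]; exact List.take_left' rfl
    have hdrop : name.toList.drop (name.toList.length - 4) = ['.', v, f, n] := by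
      rw [hk, hs]; exact List.drop_left' rfl
    refine ⟨⟨⟨by omega, by omega⟩, ?_⟩, ?_⟩
    · rw [hdrop]
      rcases hv with rfl | rfl <;> rcases hf with rfl | rfl <;> rcases hn with rfl | rfl <;> decide
    · intro c hc
      rw [htake] at hc
      rw [← pv_class_eq c (List.all_eq_true.mp hdom c (by rw [hs]; exact List.mem_append_left _ hc))]
      exact hcls c hc


-- ===== VERDICT (by name: the statement is the Claim_ definition above) =====
theorem is_83_font_name_spec : Claim_equal_is_83_font_name := by
  intro name hdom
  unfold Spec_is_83_font_name
  have h : name.toList.all pvDomChar = true := hdom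
  have hiff := (pv_A_true_iff name h).trans (pv_B_true_iff name h).symm
  cases hA : is_83_font_name name <;> cases hB : is_83_font_name_alt name <;> simp_all
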